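-- pv_equiv track=rewrite | github.com/aaghantasala-beep/MedibotX | rules.py | evaluate_followup
-- ===== SOURCE A (Python) =====
-- def evaluate_followup(condition_id: str, answers_dict: dict):
--     final_severity = "Low"
--     final_advice = "Monitor symptoms and consult a doctor if they worsen."
--
--     # Helper: safely read choice answers
--     def ans_yes(q):
--         return str(answers_dict.get(q, "")).strip().lower() == "yes"
--
--     # Helper: safely read number answers
--     def ans_num(q):
--         try:
--             return int(answers_dict.get(q, 0))
--         except:
--             return 0
--
--     # ✅ HEART
--     if condition_id == "heart":
--         if any(answers_dict.values()):
--             final_severity = "High"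
--             final_advice = "Chest pain with risk signs needs emergency care. Call emergency services immediately."
--         else:
--             final_severity = "Medium"
--             final_advice = "Chest discomfort should not be ignored. Consult a doctor soon."
--
--     # ✅ BREATHING
--     elif condition_id == "breathing":
--         if "yes" in [str(v).lower() for v in answers_dict.values()]:
--             final_severity = "High"
--             final_advice = "Breathing difficulty may be serious. Seek urgent medical attention immediately."
--         else:
--             final_severity = "Medium"
--             final_advice = "If breathing discomfort continues, consult a doctor and avoid exertion."
--
--     # ✅ VIRAL FEVER
--     elif condition_id == "viral":
--         days_q = "How many days have you had fever?"
--         days = ans_num(days_q)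
--
--         if days >= 3:
--             final_severity = "Medium"
--             final_advice = "Fever lasting 3+ days needs doctor consultation and testing if required."
--         else:
--             final_severity = "Low"
--             final_advice = "Rest, fluids, and monitor temperature."
--
--     # ✅ FOOD POISONING
--     elif condition_id == "food_poisoning":
--         count_q = "How many times did you vomit or have loose motions today?"
--         count = ans_num(count_q)
--
--         if count >= 6:
--             final_severity = "High"
--             final_advice = "High risk of dehydration. Seek medical help quickly and continue ORS if possible."
--         else:
--             final_severity = "Medium"
--             final_advice = "Take ORS, rest, and eat bland food. Consult a doctor if symptoms persist."
--
--     # ✅ STOMACH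
--     elif condition_id == "stomach":
--         pain_q = "Rate your stomach pain from 1 to 10"
--         pain = ans_num(pain_q)
--
--         if pain >= 7:
--             final_severity = "Medium"
--             final_advice = "Severe stomach pain should be checked by a doctor soon."
--         else:
--             final_severity = "Low"
--             final_advice = "Light diet + hydration. Avoid spicy/oily meals."
--
--     # ✅ UTI
--     elif condition_id == "uti":
--         if "yes" in [str(v).lower() for v in answers_dict.values()]:
--             final_severity = "Medium"
--             final_advice = "UTI symptoms with fever/back pain need doctor evaluation soon."
--         else:
--             final_severity = "Low"
--             final_advice = "Drink water and monitor. Consult doctor if burning continues."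
--
--     return {
--         "final_severity": final_severity,
--         "final_advice": final_advice,
--     }
-- ===== SOURCE B (Python) =====
-- # B: single pass over the answers extracting all features (truthy/yes/nums),
-- # then a declarative rule table interpreted generically, plus a flat
-- # (condition, escalate) -> result table.
--
-- _RULES = {
--     "heart": ("truthy", None, 0),
--     "breathing": ("yes", None, 0),
--     "viral": ("num", "How many days have you had fever?", 3),
--     "food_poisoning": ("num", "How many times did you vomit or have loose motions today?", 6),
--     "stomach": ("num", "Rate your stomach pain from 1 to 10", 7),
--     "uti": ("yes", None, 0),
-- }
--
-- _DEFAULT = ("Low", "Monitor symptoms and consult a doctor if they worsen.")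
--
-- _RESULTS = {
--     ("heart", True): ("High", "Chest pain with risk signs needs emergency care. Call emergency services immediately."),
--     ("heart", False): ("Medium", "Chest discomfort should not be ignored. Consult a doctor soon."),
--     ("breathing", True): ("High", "Breathing difficulty may be serious. Seek urgent medical attention immediately."),
--     ("breathing", False): ("Medium", "If breathing discomfort continues, consult a doctor and avoid exertion."),
--     ("viral", True): ("Medium", "Fever lasting 3+ days needs doctor consultation and testing if required."),
--     ("viral", False): ("Low", "Rest, fluids, and monitor temperature."),
--     ("food_poisoning", True): ("High", "High risk of dehydration. Seek medical help quickly and continue ORS if possible."),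
--     ("food_poisoning", False): ("Medium", "Take ORS, rest, and eat bland food. Consult a doctor if symptoms persist."),
--     ("stomach", True): ("Medium", "Severe stomach pain should be checked by a doctor soon."),
--     ("stomach", False): ("Low", "Light diet + hydration. Avoid spicy/oily meals."),
--     ("uti", True): ("Medium", "UTI symptoms with fever/back pain need doctor evaluation soon."),
--     ("uti", False): ("Low", "Drink water and monitor. Consult doctor if burning continues."),
-- }
--
--
-- def evaluate_followup(condition_id: str, answers_dict: dict):
--     # one pass: collect every feature any rule can ask about
--     truthy = False
--     has_yes = False
--     nums = {}
--     for q, v in answers_dict.items():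
--         s = str(v)
--         if s:
--             truthy = True
--         if s.lower() == "yes":
--             has_yes = True
--         try:
--             nums[q] = int(s)
--         except Exception:
--             nums[q] = 0
--
--     mode, arg, thr = _RULES.get(condition_id, ("none", None, 0))
--     if mode == "truthy":
--         escalate = truthy
--     elif mode == "yes":
--         escalate = has_yes
--     elif mode == "num":
--         escalate = nums.get(arg, 0) >= thr
--     else:
--         escalate = False
--
--     severity, advice = _RESULTS.get((condition_id, escalate), _DEFAULT)
--     return {"final_severity": severity, "final_advice": advice}
-- ===== Notes on version B (the rewrite author's own statement) =====
-- stated objective: alternative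
-- what changed: Replaced A's if/elif chain of per-condition predicates by a single pass over the answers that extracts every feature (any-truthy, any-'yes', per-question numeric values) up front, then interprets a declarative rule table (condition -> mode/question/threshold) and a flat (condition, escalate) -> (severity, advice) result table.
import Mathlib
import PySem

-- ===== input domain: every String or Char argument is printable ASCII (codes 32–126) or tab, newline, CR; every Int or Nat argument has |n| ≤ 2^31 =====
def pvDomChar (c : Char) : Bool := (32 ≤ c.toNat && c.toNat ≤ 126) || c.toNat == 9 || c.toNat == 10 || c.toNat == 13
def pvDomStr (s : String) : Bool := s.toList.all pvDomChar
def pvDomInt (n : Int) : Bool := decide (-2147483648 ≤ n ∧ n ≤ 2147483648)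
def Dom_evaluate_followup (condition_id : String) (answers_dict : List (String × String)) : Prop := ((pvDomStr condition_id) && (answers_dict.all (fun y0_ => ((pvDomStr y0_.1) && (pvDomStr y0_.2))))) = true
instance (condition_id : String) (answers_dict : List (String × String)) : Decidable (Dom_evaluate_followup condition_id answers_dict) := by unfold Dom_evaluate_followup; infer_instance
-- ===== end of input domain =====

-- B makes one pass over the answers extracting features (truthy / has-yes / numeric values), then interprets a declarative rule table and a flat (condition, escalate) result table; objective: alternative.


-- ===== PORT A =====
-- int(answers_dict.get(q, 0)) with the bare except returning 0
def pvA_ansNum (d : PySem.Dict String String) (q : String) : Int :=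
  match d.get? q with
  | none => 0
  | some v => (PySem.Int.ofStr? v).getD 0

def evaluate_followup (condition_id : String) (answers_dict : List (String × String)) : List (String × String) :=
  let d := PySem.Dict.ofList answers_dict
  let r : String × String :=
    if condition_id == "heart" then
      if d.values.any (fun v => !(v == "")) then   -- any(answers_dict.values()): str truthiness = non-empty
        ("High", "Chest pain with risk signs needs emergency care. Call emergency services immediately.")
      else
        ("Medium", "Chest discomfort should not be ignored. Consult a doctor soon.")
    else if condition_id == "breathing" then
      if (d.values.map PySem.Str.lower).contains "yes" then
        ("High", "Breathing difficulty may be serious. Seek urgent medical attention immediately.")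
      else
        ("Medium", "If breathing discomfort continues, consult a doctor and avoid exertion.")
    else if condition_id == "viral" then
      if pvA_ansNum d "How many days have you had fever?" ≥ 3 then
        ("Medium", "Fever lasting 3+ days needs doctor consultation and testing if required.")
      else
        ("Low", "Rest, fluids, and monitor temperature.")
    else if condition_id == "food_poisoning" then
      if pvA_ansNum d "How many times did you vomit or have loose motions today?" ≥ 6 then
        ("High", "High risk of dehydration. Seek medical help quickly and continue ORS if possible.")
      else
        ("Medium", "Take ORS, rest, and eat bland food. Consult a doctor if symptoms persist.")
    else if condition_id == "stomach" then
      if pvA_ansNum d "Rate your stomach pain from 1 to 10" ≥ 7 then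
        ("Medium", "Severe stomach pain should be checked by a doctor soon.")
      else
        ("Low", "Light diet + hydration. Avoid spicy/oily meals.")
    else if condition_id == "uti" then
      if (d.values.map PySem.Str.lower).contains "yes" then
        ("Medium", "UTI symptoms with fever/back pain need doctor evaluation soon.")
      else
        ("Low", "Drink water and monitor. Consult doctor if burning continues.")
    else
      ("Low", "Monitor symptoms and consult a doctor if they worsen.")
  [("final_severity", r.1), ("final_advice", r.2)]

-- ===== PORT B =====
def pvB_default : String × String := ("Low", "Monitor symptoms and consult a doctor if they worsen.")

-- rule table: condition_id -> (mode, question-arg, threshold)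
def pvB_rules : List (String × (String × Option String × Int)) :=
  [("heart", ("truthy", none, 0)),
   ("breathing", ("yes", none, 0)),
   ("viral", ("num", some "How many days have you had fever?", 3)),
   ("food_poisoning", ("num", some "How many times did you vomit or have loose motions today?", 6)),
   ("stomach", ("num", some "Rate your stomach pain from 1 to 10", 7)),
   ("uti", ("yes", none, 0))]

-- flat result table keyed by (condition_id, escalate)
def pvB_results : List ((String × Bool) × (String × String)) :=
  [(("heart", true), ("High", "Chest pain with risk signs needs emergency care. Call emergency services immediately.")),
   (("heart", false), ("Medium", "Chest discomfort should not be ignored. Consult a doctor soon.")),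
   (("breathing", true), ("High", "Breathing difficulty may be serious. Seek urgent medical attention immediately.")),
   (("breathing", false), ("Medium", "If breathing discomfort continues, consult a doctor and avoid exertion.")),
   (("viral", true), ("Medium", "Fever lasting 3+ days needs doctor consultation and testing if required.")),
   (("viral", false), ("Low", "Rest, fluids, and monitor temperature.")),
   (("food_poisoning", true), ("High", "High risk of dehydration. Seek medical help quickly and continue ORS if possible.")),
   (("food_poisoning", false), ("Medium", "Take ORS, rest, and eat bland food. Consult a doctor if symptoms persist.")),
   (("stomach", true), ("Medium", "Severe stomach pain should be checked by a doctor soon.")),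
   (("stomach", false), ("Low", "Light diet + hydration. Avoid spicy/oily meals.")),
   (("uti", true), ("Medium", "UTI symptoms with fever/back pain need doctor evaluation soon.")),
   (("uti", false), ("Low", "Drink water and monitor. Consult doctor if burning continues."))]

-- the single feature-extraction pass: (truthy, has_yes, nums)
def pvB_feats (items : List (String × String)) : Bool × Bool × PySem.Dict String Int :=
  items.foldl (fun acc p =>
    (acc.1 || !(p.2 == ""),
     acc.2.1 || (PySem.Str.lower p.2 == "yes"),
     acc.2.2.insert p.1 ((PySem.Int.ofStr? p.2).getD 0)))   -- try int(s) except: 0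
    (false, false, PySem.Dict.empty)

def evaluate_followup_alt (condition_id : String) (answers_dict : List (String × String)) : List (String × String) :=
  let d := PySem.Dict.ofList answers_dict
  let f := pvB_feats d.items
  let rule := (pvB_rules.lookup condition_id).getD ("none", none, 0)
  let escalate : Bool :=
    if rule.1 == "truthy" then f.1
    else if rule.1 == "yes" then f.2.1
    else if rule.1 == "num" then
      decide (rule.2.2 ≤ (match rule.2.1 with | some q => f.2.2.getD q 0 | none => 0))
    else false
  let r := (pvB_results.lookup (condition_id, escalate)).getD pvB_default
  [("final_severity", r.1), ("final_advice", r.2)]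

-- ===== PRECONDITION & SPEC =====
def Spec_evaluate_followup (condition_id : String) (answers_dict : List (String × String)) (out : List (String × String)) : Prop := out = evaluate_followup_alt condition_id answers_dict
instance (condition_id : String) (answers_dict : List (String × String)) (out : List (String × String)) : Decidable (Spec_evaluate_followup condition_id answers_dict out) := by unfold Spec_evaluate_followup; infer_instance

-- ===== CLAIM (what is proved, stated in full; the proofs are below) =====
def Claim_equal_evaluate_followup : Prop := ∀ (condition_id : String) (answers_dict : List (String × String)), Dom_evaluate_followup condition_id answers_dict → Spec_evaluate_followup condition_id answers_dict (evaluate_followup condition_id answers_dict)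

-- ===== LEMMAS AND PROOFS =====

-- the truthy component of the pass is an 'any' over the items
theorem pvB_feats_truthy (l : List (String × String)) (t y : Bool) (m : PySem.Dict String Int) :
    (l.foldl (fun acc p =>
      (acc.1 || !(p.2 == ""),
       acc.2.1 || (PySem.Str.lower p.2 == "yes"),
       acc.2.2.insert p.1 ((PySem.Int.ofStr? p.2).getD 0))) (t, y, m)).1
    = (t || l.any (fun p => !(p.2 == ""))) := by
  induction l generalizing t y m with
  | nil => simp
  | cons a l ih => simp [List.foldl_cons, ih, Bool.or_assoc]

-- the has-yes component of the pass is an 'any' over the items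
theorem pvB_feats_yes (l : List (String × String)) (t y : Bool) (m : PySem.Dict String Int) :
    (l.foldl (fun acc p =>
      (acc.1 || !(p.2 == ""),
       acc.2.1 || (PySem.Str.lower p.2 == "yes"),
       acc.2.2.insert p.1 ((PySem.Int.ofStr? p.2).getD 0))) (t, y, m)).2.1
    = (y || l.any (fun p => PySem.Str.lower p.2 == "yes")) := by
  induction l generalizing t y m with
  | nil => simp
  | cons a l ih => simp [List.foldl_cons, ih, Bool.or_assoc]

-- looking up a question in the nums dict of the pass = first (only) matching item
theorem pvB_feats_nums (l : List (String × String))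
    (t y : Bool) (m : PySem.Dict String Int) (q : String) :
    (l.map Prod.fst).Nodup →
    ((l.foldl (fun acc p =>
      (acc.1 || !(p.2 == ""),
       acc.2.1 || (PySem.Str.lower p.2 == "yes"),
       acc.2.2.insert p.1 ((PySem.Int.ofStr? p.2).getD 0))) (t, y, m)).2.2).getD q 0
    = (match l.find? (fun p => p.1 == q) with
       | some p => (PySem.Int.ofStr? p.2).getD 0
       | none => m.getD q 0) := by
  induction l generalizing t y m with
  | nil => intro _; simp
  | cons a l ih =>
    intro hl
    simp only [List.map_cons, List.nodup_cons] at hl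
    rw [List.foldl_cons, ih _ _ _ hl.2]
    by_cases hq : a.1 = q
    · have hfind : l.find? (fun p => p.1 == q) = none := by
        rw [List.find?_eq_none]
        intro p hp
        simp only [beq_iff_eq]
        intro h
        have hm : p.1 ∈ l.map Prod.fst := List.mem_map_of_mem hp
        apply hl.1
        rw [hq, ← h]
        exact hm
      simp [hfind, hq, PySem.Dict.getD_insert_self]
    · cases hfind : l.find? (fun p => p.1 == q) with
      | some p => simp [hfind, hq]
      | none => simp [hfind, hq, PySem.Dict.getD_insert_of_ne _ _ _ (Ne.symm hq)]

-- get? as first match on items (definitional)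
theorem dict_get?_eq_find? (d : PySem.Dict String String) (q : String) :
    d.get? q = (d.items.find? (fun p => p.1 == q)).map Prod.snd := rfl

-- A's ans_num equals the nums feature of B's pass, over the dict's items
theorem ansNum_eq_feats (ad : List (String × String)) (q : String) :
    pvA_ansNum (PySem.Dict.ofList ad) q
    = ((pvB_feats (PySem.Dict.ofList ad).items).2.2).getD q 0 := by
  have hnd : ((PySem.Dict.ofList ad).items.map Prod.fst).Nodup :=
    PySem.Dict.nodup_keys_ofList (κ := String) (ν := String) ad
  rw [pvB_feats, pvB_feats_nums _ _ _ _ _ hnd]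
  rw [pvA_ansNum, dict_get?_eq_find?]
  cases (PySem.Dict.ofList ad).items.find? (fun p => p.1 == q) <;> simp [PySem.Dict.getD_empty]

-- 'yes' membership over lowered values = an 'any' over the items
theorem contains_lower_yes_eq_any (l : List (String × String)) :
    ((l.map Prod.snd).map PySem.Str.lower).contains "yes"
    = l.any (fun p => PySem.Str.lower p.2 == "yes") := by
  induction l with
  | nil => rfl
  | cons a l ih =>
    simp only [List.map_cons, List.contains_cons, List.any_cons, ih, BEq.comm]

set_option maxHeartbeats 1000000 in
-- ===== VERDICT (by name: the statement is the Claim_ definition above) =====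
theorem evaluate_followup_spec : Claim_equal_evaluate_followup := by
  intro c ad _
  unfold Spec_evaluate_followup evaluate_followup evaluate_followup_alt
  simp only [ge_iff_le]
  have ht : (pvB_feats (PySem.Dict.ofList ad).items).1
      = (PySem.Dict.ofList ad).items.any (fun p => !(p.2 == "")) := by
    rw [pvB_feats, pvB_feats_truthy]; simp
  have hy : (pvB_feats (PySem.Dict.ofList ad).items).2.1
      = (PySem.Dict.ofList ad).items.any (fun p => PySem.Str.lower p.2 == "yes") := by
    rw [pvB_feats, pvB_feats_yes]; simp
  have hn : ∀ q, ((pvB_feats (PySem.Dict.ofList ad).items).2.2).getD q 0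
      = pvA_ansNum (PySem.Dict.ofList ad) q := fun q => (ansNum_eq_feats ad q).symm
  have hA1 : (PySem.Dict.ofList ad).values.any (fun v => !(v == ""))
      = (pvB_feats (PySem.Dict.ofList ad).items).1 := by
    rw [ht]; simp [PySem.Dict.values, Function.comp_def]
  have hA2 : ((PySem.Dict.ofList ad).values.map PySem.Str.lower).contains "yes"
      = (pvB_feats (PySem.Dict.ofList ad).items).2.1 :=
    (contains_lower_yes_eq_any (PySem.Dict.ofList ad).items).trans hy.symm
  by_cases h1 : c = "heart"
  · subst h1
    rw [hA1]
    cases hb : (pvB_feats (PySem.Dict.ofList ad).items).1 <;>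
      simp [pvB_rules, pvB_results, pvB_default, List.lookup] <;> decide
  · by_cases h2 : c = "breathing"
    · subst h2
      rw [hA2]
      cases hb : (pvB_feats (PySem.Dict.ofList ad).items).2.1 <;>
        simp [pvB_rules, pvB_results, pvB_default, List.lookup] <;> decide
    · by_cases h3 : c = "viral"
      · subst h3
        by_cases hb : (3:Int) ≤ pvA_ansNum (PySem.Dict.ofList ad) "How many days have you had fever?" <;>
          simp [pvB_rules, pvB_results, pvB_default, List.lookup, hb, hn] <;> decide
      · by_cases h4 : c = "food_poisoning"
        · subst h4
          by_cases hb : (6:Int) ≤ pvA_ansNum (PySem.Dict.ofList ad) "How many times did you vomit or have loose motions today?" <;>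
            simp [pvB_rules, pvB_results, pvB_default, List.lookup, hb, hn] <;> decide
        · by_cases h5 : c = "stomach"
          · subst h5
            by_cases hb : (7:Int) ≤ pvA_ansNum (PySem.Dict.ofList ad) "Rate your stomach pain from 1 to 10" <;>
              simp [pvB_rules, pvB_results, pvB_default, List.lookup, hb, hn] <;> decide
          · by_cases h6 : c = "uti"
            · subst h6
              rw [hA2]
              cases hb : (pvB_feats (PySem.Dict.ofList ad).items).2.1 <;>
                simp [pvB_rules, pvB_results, pvB_default, List.lookup] <;> decide
            · have fkey : ∀ (k : String) (b1 b2 : Bool), ¬ c = k → ((c, b1) == (k, b2)) = false := by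
                intro k b1 b2 hk
                simp [hk]
              have e1 : (c == "heart") = false := beq_eq_false_iff_ne.mpr h1
              have e2 : (c == "breathing") = false := beq_eq_false_iff_ne.mpr h2
              have e3 : (c == "viral") = false := beq_eq_false_iff_ne.mpr h3
              have e4 : (c == "food_poisoning") = false := beq_eq_false_iff_ne.mpr h4
              have e5 : (c == "stomach") = false := beq_eq_false_iff_ne.mpr h5
              have e6 : (c == "uti") = false := beq_eq_false_iff_ne.mpr h6
              simp [pvB_rules, pvB_results, pvB_default, List.lookup,
                e1, e2, e3, e4, e5, e6, fkey, h1, h2, h3, h4, h5, h6]
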